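-- pv_equiv track=rewrite | github.com/noaakwey/rfactor-analysis | r_factor_rusle2.py | quarter_slices_from_counts
-- ===== SOURCE A (Python) =====
-- from typing import Dict, List, Optional, Tuple
--
-- def quarter_slices_from_counts(q_counts: List[int]) -> List[Tuple[int, int]]:
--     """
--     1-based inclusive band ranges for rasterio reads:
--       [(start1, end1), ...]
--     """
--     out: List[Tuple[int, int]] = []
--     s = 1
--     for n in q_counts:
--         e = s + n - 1
--         out.append((s, e))
--         s = e + 1
--     return out
-- ===== SOURCE B (Python) =====
-- from typing import Dict, List, Optional, Tuple
--
-- def quarter_slices_from_counts(q_counts: List[int]) -> List[Tuple[int, int]]: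
--     """
--     1-based inclusive band ranges for rasterio reads:
--       [(start1, end1), ...]
--     """
--     ends: List[int] = []
--     total = 0
--     for n in q_counts:
--         total += n
--         ends.append(total)
--     starts = [1] + [e + 1 for e in ends[:-1]]
--     return list(zip(starts, ends))
-- ===== Notes on version B (the rewrite author's own statement) =====
-- stated objective: alternative
-- what changed: B separates the computation into two table-building phases: a prefix-sum pass producing the inclusive end positions, then a starts table (1 shifted after each end) zipped with it, instead of threading a running start through a single loop that emits pairs.
import Mathlib
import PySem

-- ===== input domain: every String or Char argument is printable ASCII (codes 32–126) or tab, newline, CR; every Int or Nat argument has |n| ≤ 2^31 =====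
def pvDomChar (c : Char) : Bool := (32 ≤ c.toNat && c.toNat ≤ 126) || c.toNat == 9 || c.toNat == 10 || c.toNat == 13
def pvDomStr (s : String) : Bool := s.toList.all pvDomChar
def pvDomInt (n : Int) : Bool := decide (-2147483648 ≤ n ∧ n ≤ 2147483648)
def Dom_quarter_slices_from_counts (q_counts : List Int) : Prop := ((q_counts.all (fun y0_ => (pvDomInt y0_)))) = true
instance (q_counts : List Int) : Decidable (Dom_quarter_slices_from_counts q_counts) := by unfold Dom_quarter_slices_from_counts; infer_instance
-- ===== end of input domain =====

-- B builds the cumulative end positions in one pass, derives starts as 1 :: map (+1) ends[:-1],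
-- and zips them, instead of A's single loop threading a running start; objective: alternative.


-- ===== PORT A =====
-- out = []; s = 1; for n: e = s + n - 1; out.append((s, e)); s = e + 1
def quarter_slices_from_counts (q_counts : List Int) : List (Int × Int) :=
  (q_counts.foldl
    (fun (st : Int × List (Int × Int)) n =>
      let e := st.1 + n - 1
      (e + 1, st.2 ++ [(st.1, e)]))
    (1, [])).2

-- ===== PORT B =====
-- ends = prefix sums; starts = [1] + [e+1 for e in ends[:-1]]; zip(starts, ends)
def quarter_slices_from_counts_alt (q_counts : List Int) : List (Int × Int) :=
  let ends := (q_counts.foldl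
    (fun (st : Int × List Int) n => (st.1 + n, st.2 ++ [st.1 + n])) (0, [])).2
  let starts := 1 :: (PySem.List.slice ends none (some (-1))).map (fun e => e + 1)
  starts.zip ends

-- ===== PRECONDITION & SPEC =====
def Spec_quarter_slices_from_counts (q_counts : List Int) (out : List (Int × Int)) : Prop := out = quarter_slices_from_counts_alt q_counts
instance (q_counts : List Int) (out : List (Int × Int)) : Decidable (Spec_quarter_slices_from_counts q_counts out) := by unfold Spec_quarter_slices_from_counts; infer_instance

-- ===== CLAIM (what is proved, stated in full; the proofs are below) =====
def Claim_equal_quarter_slices_from_counts : Prop := ∀ (q_counts : List Int), Dom_quarter_slices_from_counts q_counts → Spec_quarter_slices_from_counts q_counts (quarter_slices_from_counts q_counts)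

-- ===== LEMMAS AND PROOFS =====

-- reference recursion: the list of (start, end) pairs beginning at start s
def pvSpecPairs (s : Int) : List Int → List (Int × Int)
  | [] => []
  | n :: t => (s, s + n - 1) :: pvSpecPairs (s + n) t

-- reference recursion for B's prefix-sum pass with running total t
def pvEndsRec (t : Int) : List Int → List Int
  | [] => []
  | n :: q => (t + n) :: pvEndsRec (t + n) q

theorem pvFoldA_eq (q : List Int) : ∀ (s : Int) (acc : List (Int × Int)),
    (q.foldl (fun (st : Int × List (Int × Int)) n =>
      let e := st.1 + n - 1
      (e + 1, st.2 ++ [(st.1, e)])) (s, acc)).2 = acc ++ pvSpecPairs s q := by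
  induction q with
  | nil => intro s acc; simp [pvSpecPairs]
  | cons n t ih =>
    intro s acc
    simp only [List.foldl, pvSpecPairs]
    rw [show s + n - 1 + 1 = s + n by ring, ih]
    simp

theorem pvFoldE_eq (q : List Int) : ∀ (t : Int) (acc : List Int),
    (q.foldl (fun (st : Int × List Int) n => (st.1 + n, st.2 ++ [st.1 + n])) (t, acc)).2
      = acc ++ pvEndsRec t q := by
  induction q with
  | nil => intro t acc; simp [pvEndsRec]
  | cons n r ih =>
    intro t acc
    simp only [List.foldl, pvEndsRec]
    rw [ih]
    simp

theorem pvZip_eq (q : List Int) : ∀ (t : Int),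
    ((t + 1) :: ((pvEndsRec t q).dropLast.map (fun e => e + 1))).zip (pvEndsRec t q)
      = pvSpecPairs (t + 1) q := by
  induction q with
  | nil => intro t; simp [pvEndsRec, pvSpecPairs]
  | cons n r ih =>
    intro t
    cases r with
    | nil => simp [pvEndsRec, pvSpecPairs]; ring
    | cons m r' =>
      have h : pvEndsRec (t + n) (m :: r') ≠ [] := by simp [pvEndsRec]
      rw [show pvEndsRec t (n :: m :: r') = (t + n) :: pvEndsRec (t + n) (m :: r') from rfl,
          List.dropLast_cons_of_ne_nil h]
      simp only [List.map, List.zip_cons_cons]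
      rw [ih (t + n)]
      simp only [pvSpecPairs]
      rw [show t + 1 + n - 1 = t + n from by ring, show t + 1 + n = t + n + 1 from by ring]

-- ===== VERDICT (by name: the statement is the Claim_ definition above) =====
theorem quarter_slices_from_counts_spec : Claim_equal_quarter_slices_from_counts := by
  intro q _
  unfold Spec_quarter_slices_from_counts quarter_slices_from_counts quarter_slices_from_counts_alt
  simp only [pvFoldA_eq, pvFoldE_eq, PySem.List.slice_to_neg_one, List.nil_append]
  simpa using (pvZip_eq q 0).symm
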